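-- pv_equiv track=rewrite | github.com/barathkumarg/Python-Learning | src/python_basic/day_04_lists/code.py | sort_leaderboard
-- ===== SOURCE A (Python) =====
-- from collections.abc import Sequence
--
-- LeaderboardEntry = tuple[str, int, int]
--
-- def sort_leaderboard(entries: Sequence[LeaderboardEntry]) -> list[LeaderboardEntry]:
--     """Sort leaderboard entries by score, then penalty, then name.
--
--     Sorting rules:
--     1. Higher score first.
--     2. Lower penalty minutes first.
--     3. Name ascending (case-insensitive) for deterministic display.
--
--     Args:
--         entries: Sequence of `(name, score, penalty_minutes)` tuples.
--
--     Returns: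
--         Sorted leaderboard entries as a new list.
--
--     Raises:
--         ValueError: If name is blank, score is outside 0..100, or penalty is negative.
--     """
--     normalized: list[LeaderboardEntry] = []
--     for name, score, penalty_minutes in entries:
--         cleaned_name = name.strip()
--         if not cleaned_name:
--             raise ValueError(f"name must not be empty, got name={name!r}")
--         if score < 0 or score > 100:
--             raise ValueError(f"score must be in 0..100, got score={score}")
--         if penalty_minutes < 0:
--             raise ValueError(
--                 f"penalty_minutes must be >= 0, got penalty_minutes={penalty_minutes}"
--             )
--         normalized.append((cleaned_name, score, penalty_minutes))
--
--     by_name = sorted(normalized, key=lambda row: row[0].lower())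
--     by_penalty = sorted(by_name, key=lambda row: row[2])
--     return sorted(by_penalty, key=lambda row: row[1], reverse=True)
-- ===== SOURCE B (Python) =====
-- def sort_leaderboard(entries):
--     # Bucket sort: scores are validated into 0..100, so distribute rows into
--     # 101 score buckets, then emit buckets from high score to low, each bucket
--     # stably sorted by (penalty, case-insensitive name).
--     buckets = [[] for _ in range(101)]
--     for name, score, penalty_minutes in entries:
--         cleaned_name = name.strip()
--         if not cleaned_name:
--             raise ValueError(f"name must not be empty, got name={name!r}")
--         if score < 0 or score > 100:
--             raise ValueError(f"score must be in 0..100, got score={score}")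
--         if penalty_minutes < 0:
--             raise ValueError(
--                 f"penalty_minutes must be >= 0, got penalty_minutes={penalty_minutes}"
--             )
--         buckets[score].append((cleaned_name, score, penalty_minutes))
--     result = []
--     for score in range(100, -1, -1):
--         bucket = buckets[score]
--         bucket.sort(key=lambda row: (row[2], row[0].lower()))
--         result.extend(bucket)
--     return result
-- ===== Notes on version B (the rewrite author's own statement) =====
-- stated objective: alternative
-- what changed: B replaces the three chained stable sorts by a bucket sort: rows are distributed into 101 score buckets during validation, and the output is emitted from bucket 100 down to 0 with each bucket stably sorted by (penalty, lowercased name).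
import Mathlib
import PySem

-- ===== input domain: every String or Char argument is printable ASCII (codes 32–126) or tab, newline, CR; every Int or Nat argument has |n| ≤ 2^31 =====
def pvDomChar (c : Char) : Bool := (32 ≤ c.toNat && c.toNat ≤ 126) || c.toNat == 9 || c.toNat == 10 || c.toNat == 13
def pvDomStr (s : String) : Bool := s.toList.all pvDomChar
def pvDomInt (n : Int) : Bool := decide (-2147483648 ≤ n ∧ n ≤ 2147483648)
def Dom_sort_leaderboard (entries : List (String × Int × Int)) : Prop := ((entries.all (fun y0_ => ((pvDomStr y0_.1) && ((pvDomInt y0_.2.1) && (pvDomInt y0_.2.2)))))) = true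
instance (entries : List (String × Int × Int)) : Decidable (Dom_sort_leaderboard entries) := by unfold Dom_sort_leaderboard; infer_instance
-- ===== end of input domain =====

-- B replaces A's three chained stable sorts by a bucket sort over the validated
-- score range 0..100 (per-bucket stable sort by (penalty, lowercased name)); objective: alternative.

-- ===== PORT A =====
-- A's raise branches are not modelled: Pre_sort_leaderboard excludes exactly the inputs where A raises ValueError.
def sort_leaderboard (entries : List (String × Int × Int)) : List (String × Int × Int) :=
  let normalized : List (String × Int × Int) :=
    entries.foldl (fun acc e => acc ++ [(PySem.Str.strip e.1, e.2.1, e.2.2)]) []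
  let by_name := PySem.List.sorted normalized (fun row => PySem.Str.lower row.1) false
  let by_penalty := PySem.List.sorted by_name (fun row => row.2.2) false
  PySem.List.sorted by_penalty (fun row => row.2.1) true

-- ===== PORT B =====
-- Source B's validation loop distributing rows into buckets[score] (raise branches outside Pre_, as for A)
def sort_leaderboard_alt (entries : List (String × Int × Int)) : List (String × Int × Int) :=
  let buckets : List (List (String × Int × Int)) :=
    entries.foldl
      (fun bs e =>
        bs.set (e.2.1).toNat
          ((bs.getD (e.2.1).toNat []) ++ [(PySem.Str.strip e.1, e.2.1, e.2.2)]))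
      (List.replicate 101 [])
  -- for score in range(100, -1, -1): bucket.sort(key=(penalty, lower name)); result.extend(bucket)
  (PySem.List.pyRange 100 (-1) (-1)).foldl
    (fun acc s =>
      acc ++ PySem.List.sorted2 (buckets.getD s.toNat [])
        (fun row => row.2.2) (fun row => PySem.Str.lower row.1) false)
    []

-- ===== PRECONDITION & SPEC =====
-- Pre_ excludes exactly the inputs on which A raises ValueError (blank stripped name,
-- score outside 0..100, or negative penalty); B raises the same errors there.
def Pre_sort_leaderboard (entries : List (String × Int × Int)) : Prop :=
  ∀ e ∈ entries, PySem.Str.strip e.1 ≠ "" ∧ 0 ≤ e.2.1 ∧ e.2.1 ≤ 100 ∧ 0 ≤ e.2.2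
instance (entries : List (String × Int × Int)) : Decidable (Pre_sort_leaderboard entries) := by unfold Pre_sort_leaderboard; infer_instance

def pvWitness_sort_leaderboard : (List (String × Int × Int)) :=
  [("bob", 10, 0), ("Alice", 10, 0), ("carol", 99, 5)]

def Spec_sort_leaderboard (entries : List (String × Int × Int)) (out : List (String × Int × Int)) : Prop := out = sort_leaderboard_alt entries
instance (entries : List (String × Int × Int)) (out : List (String × Int × Int)) : Decidable (Spec_sort_leaderboard entries out) := by unfold Spec_sort_leaderboard; infer_instance

-- ===== CLAIM (what is proved, stated in full; the proofs are below) =====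
def Claim_equal_sort_leaderboard : Prop := ∀ (entries : List (String × Int × Int)), Dom_sort_leaderboard entries → Pre_sort_leaderboard entries → Spec_sort_leaderboard entries (sort_leaderboard entries)

-- ===== LEMMAS AND PROOFS =====

-- row type abbreviation is avoided; rows are String × Int × Int throughout

def pvVal (e : String × Int × Int) : String × Int × Int :=
  (PySem.Str.strip e.1, e.2.1, e.2.2)

-- comparator of a forward stable sort by key k
def pvCmp {α κ : Type} [LinearOrder κ] (k : α → κ) : α → α → Bool := fun a b => decide (k a < k b)

-- insertion sort as a fold from accumulator acc
def pvSortI {α : Type} (c : α → α → Bool) (acc : List α) (xs : List α) : List α :=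
  xs.foldl (fun acc x => PySem.List.insertBy c x acc) acc

theorem pvSorted_eq_sortI {α κ : Type} [LinearOrder κ] (xs : List α) (k : α → κ) :
    PySem.List.sorted xs k false = pvSortI (pvCmp k) [] xs := by
  rw [PySem.List.sorted_eq_foldl_insertBy]; rfl

theorem pvInsertBy_cons {α : Type} (c : α → α → Bool) (x y : α) (ys : List α) :
    PySem.List.insertBy c x (y :: ys) =
      if c x y then x :: y :: ys else y :: PySem.List.insertBy c x ys := rfl

theorem pvInsertBy_congr {α : Type} (f g : α → α → Bool) (x : α) (L : List α)
    (h : ∀ y ∈ L, f x y = g x y) : PySem.List.insertBy f x L = PySem.List.insertBy g x L := by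
  induction L with
  | nil => rfl
  | cons y ys ih =>
      rw [pvInsertBy_cons, pvInsertBy_cons, h y (by simp),
        ih (fun z hz => h z (by simp [hz]))]

-- decide on the Lex pair key, in boolean form
theorem pvLexDec {α κ₁ κ₂ : Type} [LinearOrder κ₁] [LinearOrder κ₂]
    (k1 : α → κ₁) (k2 : α → κ₂) (x y : α) :
    pvCmp (fun a => toLex (k1 a, k2 a)) x y =
      (decide (k1 x < k1 y) || (decide (k1 x = k1 y) && decide (k2 x < k2 y))) := by
  simp [pvCmp, Prod.Lex.lt_iff]

-- inserting q (by k1) commutes with inserting x (by the lex key) when k2 x < k2 q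
theorem pvComm1 {α κ₁ κ₂ : Type} [LinearOrder κ₁] [LinearOrder κ₂]
    (k1 : α → κ₁) (k2 : α → κ₂) (x q : α) (hk : k2 x < k2 q) (L : List α) :
    PySem.List.insertBy (pvCmp k1) q (PySem.List.insertBy (pvCmp (fun a => toLex (k1 a, k2 a))) x L) =
      PySem.List.insertBy (pvCmp (fun a => toLex (k1 a, k2 a))) x (PySem.List.insertBy (pvCmp k1) q L) := by
  have hxq : pvCmp (fun a => toLex (k1 a, k2 a)) x q = !(pvCmp k1 q x) := by
    rw [pvLexDec]
    by_cases h : k1 q < k1 x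
    · have h2 : k1 x ≠ k1 q := fun e => absurd (e ▸ h) (lt_irrefl _)
      simp [pvCmp, h, not_lt.mpr h.le, h2]
    · rcases lt_or_eq_of_le (not_lt.mp h) with h' | h'
      · simp [pvCmp, h, h']
      · simp [pvCmp, h', hk]
  induction L with
  | nil =>
      simp only [PySem.List.insertBy, pvInsertBy_cons, hxq]
      cases hb : pvCmp k1 q x <;> simp
  | cons y ys ih =>
      by_cases hKy : (pvCmp (fun a => toLex (k1 a, k2 a)) x y : Bool) = true
      · have hxy : k1 x ≤ k1 y := by
          rw [pvLexDec] at hKy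
          rcases Bool.or_eq_true_iff.mp hKy with h | h
          · exact (of_decide_eq_true h).le
          · exact le_of_eq (of_decide_eq_true (Bool.and_eq_true_iff.mp h).1)
        by_cases hqx : (pvCmp k1 q x : Bool) = true
        · have hqy : pvCmp k1 q y = true :=
            decide_eq_true (lt_of_lt_of_le (of_decide_eq_true hqx) hxy)
          have hKq : pvCmp (fun a => toLex (k1 a, k2 a)) x q = false := by rw [hxq, hqx]; rfl
          simp [pvInsertBy_cons, hKy, hqx, hqy, hKq]
        · have hqx' : pvCmp k1 q x = false := by
            cases h : pvCmp k1 q x; rfl; exact absurd h hqx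
          have hKq : pvCmp (fun a => toLex (k1 a, k2 a)) x q = true := by rw [hxq, hqx']; rfl
          by_cases hqy : (pvCmp k1 q y : Bool) = true
          · simp [pvInsertBy_cons, hKy, hqx', hqy, hKq]
          · have hqy' : pvCmp k1 q y = false := by
              cases h : pvCmp k1 q y; rfl; exact absurd h hqy
            simp [pvInsertBy_cons, hKy, hqx', hqy']
      · have hKy' : pvCmp (fun a => toLex (k1 a, k2 a)) x y = false := by
          cases h : pvCmp (fun a => toLex (k1 a, k2 a)) x y; rfl; exact absurd h hKy
        have hyx : k1 y ≤ k1 x := by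
          rw [pvLexDec] at hKy'
          rcases Bool.or_eq_false_iff.mp hKy' with ⟨h1, _⟩
          exact not_lt.mp (of_decide_eq_false h1)
        by_cases hqy : (pvCmp k1 q y : Bool) = true
        · have hqx : pvCmp k1 q x = true :=
            decide_eq_true (lt_of_lt_of_le (of_decide_eq_true hqy) hyx)
          have hKq : pvCmp (fun a => toLex (k1 a, k2 a)) x q = false := by rw [hxq, hqx]; rfl
          simp [pvInsertBy_cons, hKy', hqy, hKq]
        · have hqy' : pvCmp k1 q y = false := by
            cases h : pvCmp k1 q y; rfl; exact absurd h hqy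
          simp [pvInsertBy_cons, hKy', hqy', ih]

-- pushing the fold past an already-inserted x whose k2 is below every remaining element
theorem pvStep {α κ₁ κ₂ : Type} [LinearOrder κ₁] [LinearOrder κ₂]
    (k1 : α → κ₁) (k2 : α → κ₂) (x : α) (Q : List α) (acc : List α)
    (hQ : ∀ q ∈ Q, k2 x < k2 q) :
    pvSortI (pvCmp k1) (PySem.List.insertBy (pvCmp (fun a => toLex (k1 a, k2 a))) x acc) Q =
      PySem.List.insertBy (pvCmp (fun a => toLex (k1 a, k2 a))) x (pvSortI (pvCmp k1) acc Q) := by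
  induction Q generalizing acc with
  | nil => rfl
  | cons q Q ih =>
      have h1 : pvSortI (pvCmp k1) (PySem.List.insertBy (pvCmp (fun a => toLex (k1 a, k2 a))) x acc) (q :: Q) =
          pvSortI (pvCmp k1)
            (PySem.List.insertBy (pvCmp k1) q (PySem.List.insertBy (pvCmp (fun a => toLex (k1 a, k2 a))) x acc)) Q := rfl
      rw [h1, pvComm1 k1 k2 x q (hQ q (by simp)) acc,
        ih (PySem.List.insertBy (pvCmp k1) q acc) (fun r hr => hQ r (by simp [hr]))]
      rfl

-- sorting (by k1) an insertBy-(by k2) extension of a k2-sorted list = lex-inserting into the k1-sort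
theorem pvIns {α κ₁ κ₂ : Type} [LinearOrder κ₁] [LinearOrder κ₂]
    (k1 : α → κ₁) (k2 : α → κ₂) (x : α) (L : List α) (acc : List α)
    (hL : L.Pairwise (fun a b => k2 a ≤ k2 b)) (hacc : ∀ a ∈ acc, k2 a ≤ k2 x) :
    pvSortI (pvCmp k1) acc (PySem.List.insertBy (pvCmp k2) x L) =
      PySem.List.insertBy (pvCmp (fun a => toLex (k1 a, k2 a))) x (pvSortI (pvCmp k1) acc L) := by
  induction L generalizing acc with
  | nil =>
      show PySem.List.insertBy (pvCmp k1) x acc = _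
      exact pvInsertBy_congr _ _ x acc (fun a ha => by
        have h2 : ¬ k2 x < k2 a := not_lt.mpr (hacc a ha)
        rw [pvLexDec]
        by_cases h : k1 x < k1 a
        · simp [pvCmp, h]
        · simp [pvCmp, h, h2])
  | cons y ys ih =>
      by_cases hxy : (pvCmp k2 x y : Bool) = true
      · have hxy' : k2 x < k2 y := of_decide_eq_true hxy
        have hQ : ∀ q ∈ y :: ys, k2 x < k2 q := by
          intro q hq
          rcases List.mem_cons.mp hq with rfl | hq
          · exact hxy'
          · exact lt_of_lt_of_le hxy' ((List.pairwise_cons.mp hL).1 q hq)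
        rw [pvInsertBy_cons _ x y, hxy, if_pos rfl]
        have h1 : pvSortI (pvCmp k1) acc (x :: y :: ys) =
            pvSortI (pvCmp k1) (PySem.List.insertBy (pvCmp k1) x acc) (y :: ys) := rfl
        rw [h1, pvInsertBy_congr (pvCmp k1) (pvCmp (fun a => toLex (k1 a, k2 a))) x acc (fun a ha => by
          have h2 : ¬ k2 x < k2 a := not_lt.mpr (hacc a ha)
          rw [pvLexDec]
          by_cases h : k1 x < k1 a
          · simp [pvCmp, h]
          · simp [pvCmp, h, h2])]
        exact pvStep k1 k2 x (y :: ys) acc hQ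
      · have hxy' : pvCmp k2 x y = false := by
          cases h : pvCmp k2 x y; rfl; exact absurd h hxy
        have hyx : k2 y ≤ k2 x := not_lt.mp (of_decide_eq_false hxy')
        rw [pvInsertBy_cons _ x y, hxy', if_neg (by simp)]
        have h1 : pvSortI (pvCmp k1) acc (y :: PySem.List.insertBy (pvCmp k2) x ys) =
            pvSortI (pvCmp k1) (PySem.List.insertBy (pvCmp k1) y acc) (PySem.List.insertBy (pvCmp k2) x ys) := rfl
        rw [h1, ih (PySem.List.insertBy (pvCmp k1) y acc) (List.pairwise_cons.mp hL).2
          (fun a ha => by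
            rcases (PySem.List.insertBy_mem_iff _ _ _ _).mp ha with rfl | ha
            · exact hyx
            · exact hacc a ha)]
        rfl

-- two chained stable sorts = one stable sort on the lexicographic pair key
theorem pvChain {α κ₁ κ₂ : Type} [LinearOrder κ₁] [LinearOrder κ₂]
    (k1 : α → κ₁) (k2 : α → κ₂) (xs : List α) :
    PySem.List.sorted (PySem.List.sorted xs k2 false) k1 false =
      PySem.List.sorted xs (fun x => toLex (k1 x, k2 x)) false := by
  induction xs using List.reverseRecOn with
  | nil => rfl
  | append_singleton xs x ih =>
      have hsnoc : ∀ {κ : Type} [inst : LinearOrder κ] (k : α → κ) (l : List α),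
          PySem.List.sorted (l ++ [x]) k false =
            PySem.List.insertBy (pvCmp k) x (PySem.List.sorted l k false) := by
        intro κ _ k l
        rw [pvSorted_eq_sortI, pvSorted_eq_sortI]
        simp [pvSortI, List.foldl_append]
      rw [hsnoc, hsnoc, pvSorted_eq_sortI,
        pvIns k1 k2 x (PySem.List.sorted xs k2 false) []
          (PySem.List.sorted_pairwise xs k2) (by simp),
        ← pvSorted_eq_sortI, ih]

theorem pvFoldl_append_map (entries : List (String × Int × Int)) (init : List (String × Int × Int)) :
    entries.foldl (fun acc e => acc ++ [(PySem.Str.strip e.1, e.2.1, e.2.2)]) init =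
      init ++ entries.map pvVal := by
  induction entries generalizing init with
  | nil => simp
  | cons e es ih => simp [List.foldl_cons, ih, pvVal]

-- reverse=True over an Int key is the forward sort by the negated key
theorem pvRevNeg (L : List (String × Int × Int)) :
    PySem.List.sorted L (fun row => row.2.1) true =
      PySem.List.sorted L (fun row => -row.2.1) false := by
  show List.foldl _ [] L = List.foldl _ [] L
  have : (fun (a b : String × Int × Int) => decide (b.2.1 < a.2.1)) =
      (fun (a b : String × Int × Int) => decide (-a.2.1 < -b.2.1)) := by
    funext a b
    simp only [decide_eq_decide]
    omega
  rw [show ((if (true : Bool) = true then fun (a b : String × Int × Int) => decide (b.2.1 < a.2.1)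
      else fun a b => decide (a.2.1 < b.2.1))) = fun (a b : String × Int × Int) => decide (b.2.1 < a.2.1) from rfl,
    this]
  rfl

-- the composite key A's chained sorts realise
def pvK (r : String × Int × Int) : Lex (Lex (Int × Int) × String) :=
  toLex (toLex ((-r.2.1 : Int), r.2.2), PySem.Str.lower r.1)

-- sorted2's comparator for key (penalty, lower name)
def pvC2 (a b : String × Int × Int) : Bool :=
  decide (a.2.2 < b.2.2) || (!decide (b.2.2 < a.2.2) && decide (PySem.Str.lower a.1 < PySem.Str.lower b.1))

-- one score bucket of V, sorted the way Source B sorts it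
def pvSeg (V : List (String × Int × Int)) (s : Int) : List (String × Int × Int) :=
  PySem.List.sorted2 (V.filter (fun r => decide (r.2.1 = s)))
    (fun row => row.2.2) (fun row => PySem.Str.lower row.1) false

theorem pvSorted2_eq_foldl (xs : List (String × Int × Int)) :
    PySem.List.sorted2 xs (fun row => row.2.2) (fun row => PySem.Str.lower row.1) false =
      xs.foldl (fun acc x => PySem.List.insertBy pvC2 x acc) [] := rfl

theorem pvInsertBy_all_true {α : Type} (c : α → α → Bool) (x : α) (L : List α)
    (h : ∀ y ∈ L, c x y = true) : PySem.List.insertBy c x L = x :: L := by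
  cases L with
  | nil => rfl
  | cons y ys => rw [pvInsertBy_cons, h y (by simp), if_pos rfl]

theorem pvInsertBy_append_of_not {α : Type} (c : α → α → Bool) (x : α) (L1 L2 : List α)
    (h : ∀ y ∈ L1, c x y = false) :
    PySem.List.insertBy c x (L1 ++ L2) = L1 ++ PySem.List.insertBy c x L2 := by
  induction L1 with
  | nil => rfl
  | cons y ys ih =>
      rw [List.cons_append, pvInsertBy_cons, h y (by simp), if_neg (by simp),
        ih (fun z hz => h z (by simp [hz])), List.cons_append]

theorem pvInsertBy_split {α : Type} (c c' : α → α → Bool) (x : α) (S B : List α)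
    (hS : ∀ y ∈ S, c x y = c' x y) (hB : ∀ y ∈ B, c x y = true) :
    PySem.List.insertBy c x (S ++ B) = PySem.List.insertBy c' x S ++ B := by
  induction S with
  | nil => rw [List.nil_append, pvInsertBy_all_true c x B hB]; rfl
  | cons y ys ih =>
      rw [List.cons_append, pvInsertBy_cons, pvInsertBy_cons, hS y (by simp)]
      by_cases h : c' x y = true
      · rw [h]; simp
      · have h' : c' x y = false := by cases hcy : c' x y; rfl; exact absurd hcy h
        rw [h']
        simp only [if_neg (by decide : ¬ (false = true)), List.cons_append]
        rw [ih (fun z hz => hS z (by simp [hz]))]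

-- members of a score bucket have that score
theorem pvSeg_score (V : List (String × Int × Int)) (s : Int) :
    ∀ y ∈ pvSeg V s, y.2.1 = s := by
  intro y hy
  have hperm := PySem.List.sorted2_perm (V.filter (fun r => decide (r.2.1 = s)))
    (fun row : String × Int × Int => row.2.2) (fun row => PySem.Str.lower row.1) false
  have : y ∈ V.filter (fun r => decide (r.2.1 = s)) := hperm.mem_iff.mp hy
  exact of_decide_eq_true (List.mem_filter.mp this).2

-- comparator facts about pvK
theorem pvCK_of_score_gt (x y : String × Int × Int) (h : x.2.1 < y.2.1) :
    pvCmp pvK x y = false := by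
  have hne : ¬ ((-x.2.1 : Int) = -y.2.1) := by omega
  have hnlt : ¬ ((-x.2.1 : Int) < -y.2.1) := by omega
  simp [pvCmp, pvK, Prod.Lex.lt_iff, hne, hnlt]

theorem pvCK_of_score_lt (x y : String × Int × Int) (h : y.2.1 < x.2.1) :
    pvCmp pvK x y = true := by
  have hlt : ((-x.2.1 : Int) < -y.2.1) := by omega
  simp [pvCmp, pvK, Prod.Lex.lt_iff, hlt]

theorem pvCK_of_score_eq (x y : String × Int × Int) (h : x.2.1 = y.2.1) :
    pvCmp pvK x y = pvC2 x y := by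
  simp only [pvCmp, pvK, pvC2, Prod.Lex.lt_iff, ofLex_toLex, toLex_inj, Prod.mk.injEq, h]
  by_cases h1 : x.2.2 < y.2.2
  · simp [h1]
  · by_cases h2 : y.2.2 < x.2.2
    · have : x.2.2 ≠ y.2.2 := by omega
      simp [h2, this]
    · have : x.2.2 = y.2.2 := by omega
      simp [this]

-- THE BUCKET DECOMPOSITION: the stable sort by pvK is the concatenation of the
-- per-score buckets taken in strictly decreasing score order
theorem pvMain (ss : List Int) (hss : ss.Pairwise (· > ·)) (V : List (String × Int × Int))
    (hV : ∀ r ∈ V, r.2.1 ∈ ss) :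
    PySem.List.sorted V pvK false = ss.flatMap (pvSeg V) := by
  induction V using List.reverseRecOn with
  | nil =>
      rw [show PySem.List.sorted ([] : List (String × Int × Int)) pvK false = [] from rfl]
      exact (List.flatMap_eq_nil_iff.mpr (fun s _ => rfl)).symm
  | append_singleton V x ih =>
      obtain ⟨ss1, ss2, rfl⟩ := List.append_of_mem (hV x (by simp))
      have hps := List.pairwise_append.mp hss
      have h1gt : ∀ a ∈ ss1, x.2.1 < a := fun a ha => hps.2.2 a ha x.2.1 (by simp)
      have h2lt : ∀ a ∈ ss2, a < x.2.1 := fun a ha => (List.pairwise_cons.mp hps.2.1).1 a ha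
      have hVs : ∀ r ∈ V, r.2.1 ∈ ss1 ++ x.2.1 :: ss2 := fun r hr => hV r (by simp [hr])
      -- snoc on the sorted side
      have hsnoc : PySem.List.sorted (V ++ [x]) pvK false =
          PySem.List.insertBy (pvCmp pvK) x (PySem.List.sorted V pvK false) := by
        rw [pvSorted_eq_sortI, pvSorted_eq_sortI]
        simp [pvSortI, List.foldl_append]
      -- buckets of V ++ [x]
      have hseg_ne : ∀ s : Int, s ≠ x.2.1 → pvSeg (V ++ [x]) s = pvSeg V s := by
        intro s hs
        unfold pvSeg
        rw [List.filter_append]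
        have hxs : ¬ (x.2.1 = s) := fun hh => hs hh.symm
        have : ([x].filter (fun r => decide (r.2.1 = s))) = [] := by
          simp [hxs]
        rw [this, List.append_nil]
      have hseg_eq : pvSeg (V ++ [x]) x.2.1 = PySem.List.insertBy pvC2 x (pvSeg V x.2.1) := by
        unfold pvSeg
        rw [List.filter_append]
        have : ([x].filter (fun r => decide (r.2.1 = x.2.1))) = [x] := by simp
        rw [this, pvSorted2_eq_foldl, pvSorted2_eq_foldl, List.foldl_append]
        rfl
      have hne1 : ∀ s ∈ ss1, pvSeg (V ++ [x]) s = pvSeg V s := fun s hs =>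
        hseg_ne s (by have := h1gt s hs; omega)
      have hne2 : ∀ s ∈ ss2, pvSeg (V ++ [x]) s = pvSeg V s := fun s hs =>
        hseg_ne s (by have := h2lt s hs; omega)
      rw [hsnoc, ih (fun r hr => hVs r hr)]
      rw [List.flatMap_append, List.flatMap_cons, List.flatMap_append, List.flatMap_cons]
      rw [show ss1.flatMap (pvSeg (V ++ [x])) = ss1.flatMap (pvSeg V) from by
        simp only [List.flatMap]; rw [List.map_congr_left hne1]]
      rw [show ss2.flatMap (pvSeg (V ++ [x])) = ss2.flatMap (pvSeg V) from by
        simp only [List.flatMap]; rw [List.map_congr_left hne2]]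
      rw [hseg_eq]
      rw [pvInsertBy_append_of_not (pvCmp pvK) x (ss1.flatMap (pvSeg V)) _ (by
        intro y hy
        obtain ⟨s, hs, hy⟩ := List.mem_flatMap.mp hy
        exact pvCK_of_score_gt x y ((pvSeg_score V s y hy) ▸ h1gt s hs))]
      congr 1
      exact pvInsertBy_split (pvCmp pvK) pvC2 x (pvSeg V x.2.1) (ss2.flatMap (pvSeg V))
        (fun y hy => pvCK_of_score_eq x y ((pvSeg_score V x.2.1 y hy).symm))
        (by
          intro y hy
          obtain ⟨s, hs, hy⟩ := List.mem_flatMap.mp hy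
          exact pvCK_of_score_lt x y ((pvSeg_score V s y hy) ▸ h2lt s hs))

-- the bucket fold builds exactly the per-score filters of the validated rows
theorem pvBuckets (entries : List (String × Int × Int))
    (h : ∀ e ∈ entries, 0 ≤ e.2.1 ∧ e.2.1 ≤ 100)
    (bs0 : List (List (String × Int × Int))) (hlen : bs0.length = 101) :
    (entries.foldl
      (fun bs e => bs.set (e.2.1).toNat
        ((bs.getD (e.2.1).toNat []) ++ [(PySem.Str.strip e.1, e.2.1, e.2.2)])) bs0).length = 101 ∧
    ∀ s : Int, 0 ≤ s → s ≤ 100 →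
      (entries.foldl
        (fun bs e => bs.set (e.2.1).toNat
          ((bs.getD (e.2.1).toNat []) ++ [(PySem.Str.strip e.1, e.2.1, e.2.2)])) bs0).getD s.toNat [] =
        bs0.getD s.toNat [] ++ (entries.map pvVal).filter (fun r => decide (r.2.1 = s)) := by
  induction entries generalizing bs0 with
  | nil => exact ⟨hlen, fun s _ _ => by simp⟩
  | cons e es ih =>
      obtain ⟨he1, he2⟩ := h e (by simp)
      have hes : ∀ e' ∈ es, 0 ≤ e'.2.1 ∧ e'.2.1 ≤ 100 := fun e' he' => h e' (by simp [he'])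
      have hidx : (e.2.1).toNat < bs0.length := by rw [hlen]; omega
      set bs1 := bs0.set (e.2.1).toNat
        ((bs0.getD (e.2.1).toNat []) ++ [(PySem.Str.strip e.1, e.2.1, e.2.2)]) with hbs1
      have hlen1 : bs1.length = 101 := by rw [hbs1, List.length_set, hlen]
      obtain ⟨hL, hG⟩ := ih hes bs1 hlen1
      refine ⟨hL, fun s hs0 hs1 => ?_⟩
      rw [List.foldl_cons, hG s hs0 hs1]
      have hmap : ((e :: es).map pvVal).filter (fun r => decide (r.2.1 = s)) =
          ([pvVal e].filter (fun r => decide (r.2.1 = s))) ++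
            (es.map pvVal).filter (fun r => decide (r.2.1 = s)) := by
        rw [List.map_cons, List.filter_cons, List.filter_singleton]
        cases hd : decide ((pvVal e).2.1 = s) <;> simp
      rw [hmap]
      by_cases hse : s = e.2.1
      · have : bs1.getD s.toNat [] = bs0.getD s.toNat [] ++ [(PySem.Str.strip e.1, e.2.1, e.2.2)] := by
          rw [hbs1, hse, List.getD_eq_getElem?_getD, List.getElem?_set_self (by omega),
            List.getD_eq_getElem?_getD, List.getElem?_eq_getElem hidx]
          rfl
        rw [this]
        have : [pvVal e].filter (fun r => decide (r.2.1 = s)) = [pvVal e] := by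
          simp [pvVal, hse]
        rw [this]
        simp [pvVal]
      · have hne : (e.2.1).toNat ≠ s.toNat := by omega
        have : bs1.getD s.toNat [] = bs0.getD s.toNat [] := by
          rw [hbs1, List.getD_eq_getElem?_getD, List.getElem?_set_ne hne,
            ← List.getD_eq_getElem?_getD]
        rw [this]
        have : [pvVal e].filter (fun r => decide (r.2.1 = s)) = [] := by
          simp [pvVal]; omega
        rw [this, List.nil_append]

-- the countdown score list is strictly decreasing and covers 0..100
theorem pvScores_pairwise : (PySem.List.pyRange 100 (-1) (-1)).Pairwise (· > ·) := by
  rw [PySem.List.pyRange_neg_one_eq_reverse, List.pairwise_reverse]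
  exact PySem.List.pairwise_lt_pyRange_one _ _

theorem pvScores_mem (s : Int) (h0 : 0 ≤ s) (h1 : s ≤ 100) :
    s ∈ PySem.List.pyRange 100 (-1) (-1) := by
  rw [PySem.List.mem_pyRange_neg_one]
  omega

-- ===== VERDICT (by name: the statement is the Claim_ definition above) =====
theorem sort_leaderboard_spec : Claim_equal_sort_leaderboard := by
  intro entries _ hpre
  show sort_leaderboard entries = sort_leaderboard_alt entries
  unfold sort_leaderboard sort_leaderboard_alt
  rw [pvFoldl_append_map, List.nil_append, pvRevNeg,
    pvChain (fun row : String × Int × Int => (-row.2.1 : Int)) _ _,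
    pvChain _ (fun row : String × Int × Int => PySem.Str.lower row.1) _,
    PySem.List.foldl_append_eq_flatMap, List.nil_append]
  obtain ⟨_, hG⟩ := pvBuckets entries
    (fun e he => ⟨(hpre e he).2.1, (hpre e he).2.2.1⟩) (List.replicate 101 []) (by simp)
  have hbg : ∀ s ∈ PySem.List.pyRange 100 (-1) (-1),
      PySem.List.sorted2
        ((entries.foldl
          (fun bs e => bs.set (e.2.1).toNat
            ((bs.getD (e.2.1).toNat []) ++ [(PySem.Str.strip e.1, e.2.1, e.2.2)]))
          (List.replicate 101 [])).getD s.toNat [])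
        (fun row => row.2.2) (fun row => PySem.Str.lower row.1) false =
        pvSeg (entries.map pvVal) s := by
    intro s hs
    rw [PySem.List.mem_pyRange_neg_one] at hs
    rw [hG s (by omega) (by omega)]
    have : (List.replicate 101 ([] : List (String × Int × Int))).getD s.toNat [] = [] := by
      rw [List.getD_eq_getElem?_getD, List.getElem?_replicate]
      split <;> rfl
    rw [this, List.nil_append]
    rfl
  have := pvMain (PySem.List.pyRange 100 (-1) (-1)) pvScores_pairwise (entries.map pvVal)
    (by
      intro r hr
      obtain ⟨e, he, rfl⟩ := List.mem_map.mp hr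
      exact pvScores_mem _ (hpre e he).2.1 (hpre e he).2.2.1)
  rw [show (fun x : String × Int × Int =>
      toLex (toLex (-x.2.1, x.2.2), PySem.Str.lower x.1)) = pvK from rfl] at *
  rw [this]
  simp only [List.flatMap]
  rw [List.map_congr_left hbg]
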